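-- pv_equiv track=rewrite | github.com/Duc-PTIT/Python | PY01071 - PYTHON FILE.py | check
-- ===== SOURCE A (Python) =====
-- def check(s):
--     s = s.lower()
--     for x in s:
--         if ord(x) < ord('a') or ord(x) > ord('z') :
--             if x != '_' and x != '.':
--                 return False
--     if ".py" in s:
--         return True
--     return False
-- ===== SOURCE B (Python) =====
-- import re
--
-- _VALID = re.compile(r'[a-z_.]*\Z')
--
-- def check(s):
--     s = s.lower()
--     return bool(_VALID.match(s)) and ".py" in s
-- ===== Notes on version B (the rewrite author's own statement) =====
-- stated objective: faster
-- what changed: Replaced the explicit per-character ord-comparison loop with early returns by a compiled regular-expression full match of the allowed character class [a-z_.], combined with the same substring check; validation runs in one C-level automaton pass instead of a Python-level loop.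
import Mathlib
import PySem

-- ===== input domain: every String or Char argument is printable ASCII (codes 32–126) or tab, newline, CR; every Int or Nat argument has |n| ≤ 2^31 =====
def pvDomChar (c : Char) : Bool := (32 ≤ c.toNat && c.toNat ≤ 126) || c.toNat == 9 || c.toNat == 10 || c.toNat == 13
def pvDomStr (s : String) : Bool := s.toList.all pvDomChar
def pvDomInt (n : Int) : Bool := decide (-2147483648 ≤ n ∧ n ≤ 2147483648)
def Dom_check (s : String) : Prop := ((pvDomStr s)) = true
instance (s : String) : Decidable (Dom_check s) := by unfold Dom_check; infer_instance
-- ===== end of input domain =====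

-- B replaces A's per-character ord-comparison loop (with early returns) by a regex full match
-- of the allowed character class [a-z_.]; same result, more idiomatic.

-- ===== PORT A =====
-- the explicit for-loop with early 'return False'
def checkLoopA : List Char → Option Bool
  | [] => none
  | x :: xs =>
    if x.toNat < 97 ∨ 122 < x.toNat then
      if x ≠ '_' ∧ x ≠ '.' then some false
      else checkLoopA xs
    else checkLoopA xs

def check (s : String) : Bool :=
  let t := PySem.Str.lower s
  match checkLoopA t.toList with
  | some b => b
  | none => if PySem.Str.isIn ".py" t then true else false

-- ===== PORT B =====
-- re.fullmatch of the class [a-z_.]* is ported as its meaning: every character matches the class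
def pvClassMatch (c : Char) : Bool := (97 ≤ c.toNat && c.toNat ≤ 122) || c == '_' || c == '.'

def check_alt (s : String) : Bool :=
  let t := PySem.Str.lower s
  t.toList.all pvClassMatch && PySem.Str.isIn ".py" t

-- ===== PRECONDITION & SPEC =====
def Spec_check (s : String) (out : Bool) : Prop := out = check_alt s
instance (s : String) (out : Bool) : Decidable (Spec_check s out) := by unfold Spec_check; infer_instance

-- ===== CLAIM (what is proved, stated in full; the proofs are below) =====
def Claim_equal_check : Prop := ∀ (s : String), Dom_check s → Spec_check s (check s)

-- ===== LEMMAS AND PROOFS =====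

-- A's loop returns none iff all characters match the class, some false otherwise
lemma checkLoopA_eq (l : List Char) :
    checkLoopA l = if l.all pvClassMatch then none else some false := by
  induction l with
  | nil => simp [checkLoopA]
  | cons x xs ih =>
    simp only [checkLoopA, List.all_cons]
    by_cases h1 : x.toNat < 97 ∨ 122 < x.toNat
    · rw [if_pos h1]
      by_cases h2 : x ≠ '_' ∧ x ≠ '.'
      · rw [if_pos h2]
        have hm : pvClassMatch x = false := by
          cases hmc : pvClassMatch x
          · rfl
          · exfalso
            simp only [pvClassMatch, Bool.or_eq_true, Bool.and_eq_true, decide_eq_true_eq,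
              beq_iff_eq] at hmc
            rcases hmc with (⟨ha, hb⟩ | hx) | hx
            · rcases h1 with h | h <;> omega
            · exact h2.1 hx
            · exact h2.2 hx
        simp [hm]
      · rw [if_neg h2]
        have hm : pvClassMatch x = true := by
          rcases not_and_or.mp h2 with h | h
          · have hx : x = '_' := not_not.mp h
            subst hx; decide
          · have hx : x = '.' := not_not.mp h
            subst hx; decide
        simp [hm, ih]
    · rw [if_neg h1]
      have hm : pvClassMatch x = true := by
        simp only [pvClassMatch, Bool.or_eq_true, Bool.and_eq_true, decide_eq_true_eq]
        left; left; exact ⟨by omega, by omega⟩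
      simp [hm, ih]

-- ===== VERDICT (by name: the statement is the Claim_ definition above) =====
theorem check_spec : Claim_equal_check := by
  intro s _
  unfold Spec_check check check_alt
  simp only [checkLoopA_eq]
  cases (PySem.Str.lower s).toList.all pvClassMatch
  · simp
  · cases PySem.Str.isIn ".py" (PySem.Str.lower s) <;> simp
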